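-- pv_equiv track=rewrite | github.com/cpiccin/FIUBA | Algoritmos y Programacion I/EJ2/5_en_linea.py | juego_actualizar
-- ===== SOURCE A (Python) =====
-- DIM = 10 # cantidad de filas y columnas
--
-- DIM_CASILLEROS = 30 # tamaño de los casilleros
--
-- JUGADORES = ['X', 'O']
--
-- def juego_actualizar(juego, x, y, turno):
--     '''Actualizar el estado del juego
--
--     x e y son las coordenadas (en pixels) donde el usuario hizo click.
--     Esta función determina si esas coordenadas corresponden a una celda
--     del tablero; en ese caso determina el nuevo estado del juego y lo
--     devuelve'''
--     if y < DIM_CASILLEROS*DIM and x < DIM_CASILLEROS*DIM: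
--         for i in range(DIM):
--             for j in range(DIM):
--                 if (DIM_CASILLEROS*j<x<DIM_CASILLEROS*(j+1)) and (DIM_CASILLEROS*i<y<DIM_CASILLEROS*(i+1)):
--                     if juego[i][j] == ' ':
--                         juego[i][j] = turno
--                         turno_siguiente = siguiente_turno(JUGADORES.index(turno))
--                         return juego, turno_siguiente
--     return juego, turno
--
-- def siguiente_turno(turno_actual):
--     '''Recibe el turno que modifico por ultimo el estado del juego.
--        Devuelve el proximo turno correspondiente.'''
--     if turno_actual == 0:
--         return JUGADORES[1]
--     return JUGADORES[0]
-- ===== SOURCE B (Python) =====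
-- DIM = 10 # cantidad de filas y columnas
--
-- DIM_CASILLEROS = 30 # tamaño de los casilleros
--
-- JUGADORES = ['X', 'O']
--
-- def juego_actualizar(juego, x, y, turno):
--     '''Actualizar el estado del juego (direct arithmetic instead of the
--     DIM x DIM scan): the clicked cell is (y // DIM_CASILLEROS, x // DIM_CASILLEROS),
--     valid only when the click is strictly inside a cell.'''
--     if 0 < x < DIM_CASILLEROS * DIM and 0 < y < DIM_CASILLEROS * DIM \
--             and x % DIM_CASILLEROS != 0 and y % DIM_CASILLEROS != 0:
--         i = y // DIM_CASILLEROS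
--         j = x // DIM_CASILLEROS
--         if juego[i][j] == ' ':
--             juego[i][j] = turno
--             return juego, JUGADORES[1 - JUGADORES.index(turno)]
--     return juego, turno
-- ===== Notes on version B (the rewrite author's own statement) =====
-- stated objective: simpler
-- what changed: Replaces the DIM x DIM nested scan for the clicked cell by direct arithmetic (i = y // DIM_CASILLEROS, j = x // DIM_CASILLEROS guarded by strict-interior checks x,y > 0 and x,y % DIM_CASILLEROS != 0).
-- outside the precondition, e.g. on juego_actualizar([[]], 5, 5, 'X'): A raises IndexError, B raises IndexError; on juego_actualizar([[' ']], 5, 5, 'Z'): A raises ValueError, B raises ValueError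
import Mathlib
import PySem

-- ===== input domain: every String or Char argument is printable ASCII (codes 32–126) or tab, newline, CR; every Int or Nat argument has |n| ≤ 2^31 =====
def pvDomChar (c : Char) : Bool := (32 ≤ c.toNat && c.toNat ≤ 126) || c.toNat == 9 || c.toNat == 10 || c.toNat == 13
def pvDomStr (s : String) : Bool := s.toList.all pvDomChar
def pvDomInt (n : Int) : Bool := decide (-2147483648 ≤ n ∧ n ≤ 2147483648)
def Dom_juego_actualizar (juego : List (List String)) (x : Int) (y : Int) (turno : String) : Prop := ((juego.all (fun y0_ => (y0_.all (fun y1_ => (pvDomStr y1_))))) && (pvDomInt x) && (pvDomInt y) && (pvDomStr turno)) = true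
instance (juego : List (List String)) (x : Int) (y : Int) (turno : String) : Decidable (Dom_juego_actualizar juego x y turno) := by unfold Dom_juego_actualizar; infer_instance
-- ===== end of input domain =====

-- B replaces A's DIM×DIM scan for the clicked cell by direct arithmetic (i = y//30, j = x//30
-- guarded by strict-interior checks); equivalence is about the RETURN value (both Pythons also
-- perform the same in-place board mutation).

-- ===== PORT A =====

-- juego[i][j]  (in-range under Pre_ whenever this read is reached; default "" otherwise)
def pvCell (juego : List (List String)) (i j : Int) : String :=
  PySem.List.pyGetD (PySem.List.pyGetD juego i []) j ""

-- juego[i][j] = turno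
def pvPlace (juego : List (List String)) (i j : Int) (turno : String) : List (List String) :=
  PySem.List.pySetD juego i (PySem.List.pySetD (PySem.List.pyGetD juego i []) j turno)

-- siguiente_turno: JUGADORES[1] / JUGADORES[0] folded on the literal list ['X','O']
def siguiente_turno (turno_actual : Int) : String :=
  if turno_actual = 0 then "O" else "X"

-- JUGADORES.index(turno); ValueError (none) excluded by Pre_ whenever this call is reached
def pvIndexTurno (turno : String) : Int :=
  (PySem.List.index? ["X", "O"] turno).getD 0

-- inner 'for j in range(DIM)' loop
def pvInnerA (juego : List (List String)) (x y : Int) (turno : String) (i : Int) :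
    List Int → Option (List (List String) × String)
  | [] => none
  | j :: js =>
    if 30 * j < x ∧ x < 30 * (j + 1) ∧ 30 * i < y ∧ y < 30 * (i + 1) then
      if pvCell juego i j = " " then
        some (pvPlace juego i j turno, siguiente_turno (pvIndexTurno turno))
      else pvInnerA juego x y turno i js
    else pvInnerA juego x y turno i js

-- outer 'for i in range(DIM)' loop
def pvOuterA (juego : List (List String)) (x y : Int) (turno : String) :
    List Int → Option (List (List String) × String)
  | [] => none
  | i :: is =>
    match pvInnerA juego x y turno i (PySem.List.pyRange 0 10 1) with
    | some r => some r
    | none => pvOuterA juego x y turno is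

def juego_actualizar (juego : List (List String)) (x : Int) (y : Int) (turno : String) :
    List (List String) × String :=
  if y < 30 * 10 ∧ x < 30 * 10 then
    (pvOuterA juego x y turno (PySem.List.pyRange 0 10 1)).getD (juego, turno)
  else (juego, turno)

-- ===== PORT B =====

-- JUGADORES[1 - JUGADORES.index(turno)]; index in {0,1} so the lookup never fails
def pvNextB (turno : String) : String :=
  (PySem.List.pyGet? ["X", "O"] (1 - (PySem.List.index? ["X", "O"] turno).getD 0)).getD ""

def juego_actualizar_alt (juego : List (List String)) (x : Int) (y : Int) (turno : String) :
    List (List String) × String :=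
  if 0 < x ∧ x < 30 * 10 ∧ 0 < y ∧ y < 30 * 10 ∧
      PySem.Int.mod x 30 ≠ 0 ∧ PySem.Int.mod y 30 ≠ 0 then
    -- i = y // DIM_CASILLEROS, j = x // DIM_CASILLEROS, written inline
    if pvCell juego (PySem.Int.floordiv y 30) (PySem.Int.floordiv x 30) = " " then
      (pvPlace juego (PySem.Int.floordiv y 30) (PySem.Int.floordiv x 30) turno, pvNextB turno)
    else (juego, turno)
  else (juego, turno)

-- ===== PRECONDITION & SPEC =====
-- Pre_ excludes exactly the inputs on which Python A raises: clicks strictly inside a cell of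
-- the 300×300 area whose row/column does not exist in juego (IndexError), or whose cell holds
-- ' ' while turno is not in JUGADORES (ValueError on JUGADORES.index).
def Pre_juego_actualizar (juego : List (List String)) (x : Int) (y : Int) (turno : String) : Prop :=
  (0 < x ∧ x < 300 ∧ 0 < y ∧ y < 300 ∧ PySem.Int.mod x 30 ≠ 0 ∧ PySem.Int.mod y 30 ≠ 0) →
    (((PySem.List.pyGet? juego (PySem.Int.floordiv y 30)).bind
        (fun row => PySem.List.pyGet? row (PySem.Int.floordiv x 30))).isSome = true ∧
     (((PySem.List.pyGet? juego (PySem.Int.floordiv y 30)).bind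
        (fun row => PySem.List.pyGet? row (PySem.Int.floordiv x 30))) = some " " →
       turno = "X" ∨ turno = "O"))
instance (juego : List (List String)) (x : Int) (y : Int) (turno : String) :
    Decidable (Pre_juego_actualizar juego x y turno) := by
  unfold Pre_juego_actualizar; infer_instance

def pvWitness_juego_actualizar : List (List String) × Int × Int × String := ([[" "]], 5, 5, "X")

def Spec_juego_actualizar (juego : List (List String)) (x : Int) (y : Int) (turno : String)
    (out : List (List String) × String) : Prop := out = juego_actualizar_alt juego x y turno
instance (juego : List (List String)) (x : Int) (y : Int) (turno : String)
    (out : List (List String) × String) : Decidable (Spec_juego_actualizar juego x y turno out) := by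
  unfold Spec_juego_actualizar; infer_instance

-- ===== CLAIM (what is proved, stated in full; the proofs are below) =====
def Claim_equal_juego_actualizar : Prop := ∀ (juego : List (List String)) (x : Int) (y : Int) (turno : String), Dom_juego_actualizar juego x y turno → Pre_juego_actualizar juego x y turno → Spec_juego_actualizar juego x y turno (juego_actualizar juego x y turno)

-- ===== LEMMAS AND PROOFS =====

theorem pvNext_eq (turno : String) : siguiente_turno (pvIndexTurno turno) = pvNextB turno := by
  by_cases h1 : turno = "X"
  · subst h1; decide
  · by_cases h2 : turno = "O"
    · subst h2; decide
    · have hn : List.idxOf? turno ["X", "O"] = none := by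
        simp [List.idxOf?_eq_none_iff, h1, h2]
      simp [siguiente_turno, pvIndexTurno, pvNextB, PySem.List.index?, hn]

theorem pvInnerA_eq (juego : List (List String)) (x y : Int) (turno : String) (i : Int)
    (js : List Int) :
    pvInnerA juego x y turno i js =
      if x % 30 ≠ 0 ∧ 30 * i < y ∧ y < 30 * (i + 1) ∧ x / 30 ∈ js ∧
          pvCell juego i (x / 30) = " " then
        some (pvPlace juego i (x / 30) turno, siguiente_turno (pvIndexTurno turno))
      else none := by
  induction js with
  | nil => simp [pvInnerA]
  | cons j js ih =>
    rw [pvInnerA]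
    by_cases hg : 30 * j < x ∧ x < 30 * (j + 1) ∧ 30 * i < y ∧ y < 30 * (i + 1)
    · rw [if_pos hg]
      have hj : x / 30 = j := by omega
      by_cases hc : pvCell juego i j = " "
      · rw [if_pos hc, hj, if_pos ⟨by omega, hg.2.2.1, hg.2.2.2, List.mem_cons_self .., hc⟩]
      · rw [if_neg hc, ih]
        by_cases hrest : x % 30 ≠ 0 ∧ 30 * i < y ∧ y < 30 * (i + 1) ∧ x / 30 ∈ js ∧
            pvCell juego i (x / 30) = " "
        · exact absurd (by rw [hj] at hrest; exact hrest.2.2.2.2) hc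
        · rw [if_neg hrest, if_neg]
          intro hcon
          exact hc (by rw [← hj]; exact hcon.2.2.2.2)
    · rw [if_neg hg, ih]
      by_cases hcon : x % 30 ≠ 0 ∧ 30 * i < y ∧ y < 30 * (i + 1) ∧ x / 30 ∈ (j :: js) ∧
          pvCell juego i (x / 30) = " "
      · have hne : x / 30 ≠ j := by omega
        have hmem : x / 30 ∈ js := by
          rcases List.mem_cons.mp hcon.2.2.2.1 with h | h
          · exact absurd h hne
          · exact h
        rw [if_pos hcon, if_pos ⟨hcon.1, hcon.2.1, hcon.2.2.1, hmem, hcon.2.2.2.2⟩]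
      · rw [if_neg hcon, if_neg]
        intro h
        exact hcon ⟨h.1, h.2.1, h.2.2.1, List.mem_cons_of_mem _ h.2.2.2.1, h.2.2.2.2⟩

theorem pvOuterA_eq (juego : List (List String)) (x y : Int) (turno : String) (is : List Int) :
    pvOuterA juego x y turno is =
      if x % 30 ≠ 0 ∧ 0 ≤ x / 30 ∧ x / 30 < 10 ∧ y % 30 ≠ 0 ∧ y / 30 ∈ is ∧
          pvCell juego (y / 30) (x / 30) = " " then
        some (pvPlace juego (y / 30) (x / 30) turno, siguiente_turno (pvIndexTurno turno))
      else none := by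
  induction is with
  | nil => simp [pvOuterA]
  | cons i is ih =>
    rw [pvOuterA, pvInnerA_eq, ih]
    have hmem : (x / 30 ∈ PySem.List.pyRange 0 10 1) ↔ (0 ≤ x / 30 ∧ x / 30 < 10) :=
      PySem.List.mem_pyRange_one
    by_cases hg : x % 30 ≠ 0 ∧ 30 * i < y ∧ y < 30 * (i + 1) ∧
        x / 30 ∈ PySem.List.pyRange 0 10 1 ∧ pvCell juego i (x / 30) = " "
    · have hi : y / 30 = i := by omega
      conv_rhs => rw [if_pos (show x % 30 ≠ 0 ∧ 0 ≤ x / 30 ∧ x / 30 < 10 ∧ y % 30 ≠ 0 ∧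
          y / 30 ∈ i :: is ∧ pvCell juego (y / 30) (x / 30) = " " from
        ⟨hg.1, (hmem.mp hg.2.2.2.1).1, (hmem.mp hg.2.2.2.1).2, by omega,
          by rw [hi]; exact List.mem_cons_self .., by rw [hi]; exact hg.2.2.2.2⟩)]
      rw [if_pos hg, hi]
    · rw [if_neg hg]
      by_cases hcon : x % 30 ≠ 0 ∧ 0 ≤ x / 30 ∧ x / 30 < 10 ∧ y % 30 ≠ 0 ∧
          y / 30 ∈ (i :: is) ∧ pvCell juego (y / 30) (x / 30) = " "
      · have hne : y / 30 ≠ i := by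
          intro h
          exact hg ⟨hcon.1, by omega, by omega, hmem.mpr ⟨hcon.2.1, hcon.2.2.1⟩,
            by rw [← h]; exact hcon.2.2.2.2.2⟩
        have hmem2 : y / 30 ∈ is := by
          rcases List.mem_cons.mp hcon.2.2.2.2.1 with h | h
          · exact absurd h hne
          · exact h
        rw [if_pos hcon,
          if_pos ⟨hcon.1, hcon.2.1, hcon.2.2.1, hcon.2.2.2.1, hmem2, hcon.2.2.2.2.2⟩]
      · rw [if_neg hcon, if_neg]
        intro h
        exact hcon ⟨h.1, h.2.1, h.2.2.1, h.2.2.2.1, List.mem_cons_of_mem _ h.2.2.2.2.1,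
          h.2.2.2.2.2⟩

-- ===== VERDICT (by name: the statement is the Claim_ definition above) =====
theorem juego_actualizar_spec : Claim_equal_juego_actualizar := by
  intro juego x y turno _ _
  unfold Spec_juego_actualizar juego_actualizar juego_actualizar_alt
  rw [PySem.Int.mod_eq_emod_of_pos (by norm_num : (0:Int) < 30),
    PySem.Int.mod_eq_emod_of_pos (by norm_num : (0:Int) < 30),
    PySem.Int.floordiv_eq_ediv_of_pos (by norm_num : (0:Int) < 30),
    PySem.Int.floordiv_eq_ediv_of_pos (by norm_num : (0:Int) < 30),
    pvOuterA_eq]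
  simp only [PySem.List.mem_pyRange_one]
  by_cases hB : 0 < x ∧ x < 30 * 10 ∧ 0 < y ∧ y < 30 * 10 ∧ x % 30 ≠ 0 ∧ y % 30 ≠ 0
  · rw [if_pos hB, if_pos (show y < 30 * 10 ∧ x < 30 * 10 from ⟨by omega, by omega⟩)]
    by_cases hc : pvCell juego (y / 30) (x / 30) = " "
    · rw [if_pos hc, if_pos (show x % 30 ≠ 0 ∧ 0 ≤ x / 30 ∧ x / 30 < 10 ∧ y % 30 ≠ 0 ∧
          (0 ≤ y / 30 ∧ y / 30 < 10) ∧ pvCell juego (y / 30) (x / 30) = " " from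
        ⟨hB.2.2.2.2.1, by omega, by omega, hB.2.2.2.2.2, ⟨by omega, by omega⟩, hc⟩),
        Option.getD_some, pvNext_eq]
    · rw [if_neg hc, if_neg (show ¬(x % 30 ≠ 0 ∧ 0 ≤ x / 30 ∧ x / 30 < 10 ∧ y % 30 ≠ 0 ∧
          (0 ≤ y / 30 ∧ y / 30 < 10) ∧ pvCell juego (y / 30) (x / 30) = " ") from
        fun h => hc h.2.2.2.2.2)]
      rfl
  · rw [if_neg hB]
    by_cases hA : y < 30 * 10 ∧ x < 30 * 10
    · have hC : ¬(x % 30 ≠ 0 ∧ 0 ≤ x / 30 ∧ x / 30 < 10 ∧ y % 30 ≠ 0 ∧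
          (0 ≤ y / 30 ∧ y / 30 < 10) ∧ pvCell juego (y / 30) (x / 30) = " ") := by
        rintro ⟨c1, c2, c3, c4, ⟨d1, d2⟩, -⟩
        exact hB ⟨by omega, by omega, by omega, by omega, c1, c4⟩
      rw [if_pos hA, if_neg hC]
      rfl
    · rw [if_neg hA]
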